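-- pv_equiv track=rewrite | github.com/iamnshrd/mentions | agents/mentions/services/analysis/speaker.py | extract_speaker_context
-- ===== SOURCE A (Python) =====
-- def extract_speaker_context(transcript_chunks: list[dict],
--                              query: str) -> str:
--     """Synthesize a text summary of relevant speaker context from transcript chunks.
--
--     *transcript_chunks* is the list returned by retrieve_transcripts().
--     Returns a concise text summary, or empty string if no relevant chunks.
--     """
--     if not transcript_chunks:
--         return ''
--
--     # Group chunks by speaker
--     by_speaker: dict[str, list[str]] = {}
--     for chunk in transcript_chunks:
--         speaker = chunk.get('speaker', 'Unknown')
--         text = chunk.get('text', '').strip()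
--         if text:
--             by_speaker.setdefault(speaker, []).append(text)
--
--     if not by_speaker:
--         return ''
--
--     parts = []
--     for speaker, texts in list(by_speaker.items())[:3]:  # max 3 speakers
--         excerpt = _best_excerpt(texts, query)
--         if excerpt:
--             label = f'{speaker}:' if speaker and speaker != 'Unknown' else 'Transcript:'
--             parts.append(f'{label} "{excerpt}"')
--
--     return '\n\n'.join(parts)
--
-- def _best_excerpt(texts: list[str], query: str) -> str:
--     """Select the most relevant excerpt for *query* from a list of texts."""
--     if not texts:
--         return ''
--     q_words = set(query.lower().split())
--     scored = []
--     for text in texts: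
--         t_lower = text.lower()
--         score = sum(1 for w in q_words if w in t_lower)
--         scored.append((score, text))
--     scored.sort(key=lambda x: -x[0])
--     best = scored[0][1]
--     # Truncate to ~200 chars at sentence boundary
--     if len(best) > 200:
--         cutoff = best[:200].rfind('. ')
--         if cutoff > 100:
--             best = best[:cutoff + 1]
--         else:
--             best = best[:200] + '…'
--     return best
-- ===== SOURCE B (Python) =====
-- def extract_speaker_context(transcript_chunks: list[dict],
--                              query: str) -> str:
--     """Synthesize a text summary of relevant speaker context from transcript chunks.
--
--     Single streaming pass: keeps, per speaker, the running best-scoring text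
--     (first wins on ties), instead of grouping into lists and sorting each group.
--     """
--     if not transcript_chunks:
--         return ''
--
--     q_words = set(query.lower().split())
--     order = []   # speakers in first-appearance order (among chunks with text)
--     best = {}    # speaker -> (score, text) running maximum (strict improvement)
--     for chunk in transcript_chunks:
--         speaker = chunk.get('speaker', 'Unknown')
--         text = chunk.get('text', '').strip()
--         if not text:
--             continue
--         t_lower = text.lower()
--         score = sum(1 for w in q_words if w in t_lower)
--         if speaker not in best:
--             order.append(speaker)
--             best[speaker] = (score, text)
--         elif score > best[speaker][0]:
--             best[speaker] = (score, text)
--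
--     return '\n\n'.join(
--         ('%s:' % speaker if speaker and speaker != 'Unknown' else 'Transcript:')
--         + ' "' + _truncate(best[speaker][1]) + '"'
--         for speaker in order[:3]
--     )
--
--
-- def _truncate(best: str) -> str:
--     # Truncate to ~200 chars at sentence boundary (same rule as before)
--     if len(best) > 200:
--         cutoff = best[:200].rfind('. ')
--         if cutoff > 100:
--             best = best[:cutoff + 1]
--         else:
--             best = best[:200] + '…'
--     return best
-- ===== Notes on version B (the rewrite author's own statement) =====
-- stated objective: alternative
-- what changed: B replaces A's two-phase group-chunks-into-per-speaker-text-lists then build-score-list-and-sort-each-group selection by a single streaming pass that keeps, per speaker, only the running best-scoring text (strict improvement preserves A's first-wins tie-breaking); the sort and the per-speaker text lists disappear, the truncation rule is unchanged.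
import Mathlib
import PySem

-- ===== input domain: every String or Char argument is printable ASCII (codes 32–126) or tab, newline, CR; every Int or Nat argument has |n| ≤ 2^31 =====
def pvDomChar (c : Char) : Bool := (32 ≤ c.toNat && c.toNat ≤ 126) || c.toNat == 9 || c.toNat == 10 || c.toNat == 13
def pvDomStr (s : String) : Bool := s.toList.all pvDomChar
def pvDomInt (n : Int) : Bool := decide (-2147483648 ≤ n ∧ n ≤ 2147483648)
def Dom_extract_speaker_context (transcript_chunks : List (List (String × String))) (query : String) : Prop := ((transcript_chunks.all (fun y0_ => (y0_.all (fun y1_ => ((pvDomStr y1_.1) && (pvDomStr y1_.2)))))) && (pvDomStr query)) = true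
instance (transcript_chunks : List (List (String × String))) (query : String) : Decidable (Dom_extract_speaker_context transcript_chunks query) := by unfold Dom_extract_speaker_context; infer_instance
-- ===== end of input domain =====

-- B replaces A's group-into-lists-then-sort-each-group selection by one streaming pass that
-- keeps, per speaker, the running best-scoring text (strict improvement, so first wins on ties);
-- same return value, no sort and no per-speaker text lists.

-- ===== PORT A =====
-- helper: _best_excerpt(texts, query)
def pvBestExcerptA (texts : List String) (query : String) : String :=
  if texts.isEmpty then "" else
  let q_words : List String := PySem.Set.ofList (PySem.Str.split₀ (PySem.Str.lower query))
  let scored : List (Int × String) := texts.foldl (fun acc text =>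
      let t_lower := PySem.Str.lower text
      let score := q_words.foldl (fun s w => s + (if PySem.Str.isIn w t_lower then 1 else 0)) 0
      acc ++ [(score, text)]) []
  let sortedScored := PySem.List.sorted scored (fun x => -x.1) false
  match sortedScored with
  | [] => ""          -- unreachable guard: texts ≠ [] so scored ≠ [] (Python indexes scored[0])
  | b :: _ =>
    let best := b.2
    if 200 < PySem.Str.len best then
      let cutoff := PySem.Str.rfind (PySem.Str.slice best none (some 200)) ". "
      if 100 < cutoff then PySem.Str.slice best none (some (cutoff + 1))
      else PySem.Str.slice best none (some 200) ++ "…"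
    else best

-- body of A's grouping loop over transcript_chunks
def pvStepA (d : PySem.Dict String (List String)) (chunk : List (String × String)) :
    PySem.Dict String (List String) :=
  let speaker := (PySem.Dict.ofList chunk).getD "speaker" "Unknown"
  let text := PySem.Str.strip ((PySem.Dict.ofList chunk).getD "text" "")
  if text ≠ "" then d.modify speaker [] (fun l => l ++ [text]) else d

def extract_speaker_context (transcript_chunks : List (List (String × String))) (query : String) : String :=
  if transcript_chunks.isEmpty then "" else
  let by_speaker := transcript_chunks.foldl pvStepA (PySem.Dict.empty)
  if by_speaker.items.isEmpty then "" else
  let parts := (by_speaker.items.take 3).foldl (fun parts p =>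
      let excerpt := pvBestExcerptA p.2 query
      if excerpt ≠ "" then
        let label := if p.1 ≠ "" ∧ p.1 ≠ "Unknown" then p.1 ++ ":" else "Transcript:"
        parts ++ [label ++ " \"" ++ excerpt ++ "\""]
      else parts) []
  PySem.Str.join "\n\n" parts

-- ===== PORT B =====
-- helper: _truncate(best)
def pvTruncateB (best : String) : String :=
  if 200 < PySem.Str.len best then
    let cutoff := PySem.Str.rfind (PySem.Str.slice best none (some 200)) ". "
    if 100 < cutoff then PySem.Str.slice best none (some (cutoff + 1))
    else PySem.Str.slice best none (some 200) ++ "…"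
  else best

-- body of B's single streaming loop: state = (order, best dict)
def pvStepB (q_words : List String)
    (st : List String × PySem.Dict String (Int × String)) (chunk : List (String × String)) :
    List String × PySem.Dict String (Int × String) :=
  let speaker := (PySem.Dict.ofList chunk).getD "speaker" "Unknown"
  let text := PySem.Str.strip ((PySem.Dict.ofList chunk).getD "text" "")
  if text = "" then st
  else
    let t_lower := PySem.Str.lower text
    let score := q_words.foldl (fun s w => s + (if PySem.Str.isIn w t_lower then 1 else 0)) 0
    if st.2.contains speaker = false then (st.1 ++ [speaker], st.2.insert speaker (score, text))
    else if (st.2.getD speaker (0, "")).1 < score then (st.1, st.2.insert speaker (score, text))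
    else st

def extract_speaker_context_alt (transcript_chunks : List (List (String × String))) (query : String) : String :=
  if transcript_chunks.isEmpty then "" else
  let q_words : List String := PySem.Set.ofList (PySem.Str.split₀ (PySem.Str.lower query))
  let st := transcript_chunks.foldl (pvStepB q_words) ([], PySem.Dict.empty)
  PySem.Str.join "\n\n" ((st.1.take 3).map (fun speaker =>
    (if speaker ≠ "" ∧ speaker ≠ "Unknown" then speaker ++ ":" else "Transcript:")
      ++ " \"" ++ pvTruncateB ((st.2.getD speaker (0, "")).2) ++ "\""))

-- ===== PRECONDITION & SPEC =====
def Spec_extract_speaker_context (transcript_chunks : List (List (String × String))) (query : String) (out : String) : Prop := out = extract_speaker_context_alt transcript_chunks query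
instance (transcript_chunks : List (List (String × String))) (query : String) (out : String) : Decidable (Spec_extract_speaker_context transcript_chunks query out) := by unfold Spec_extract_speaker_context; infer_instance

-- ===== CLAIM (what is proved, stated in full; the proofs are below) =====
def Claim_equal_extract_speaker_context : Prop := ∀ (transcript_chunks : List (List (String × String))) (query : String), Dom_extract_speaker_context transcript_chunks query → Spec_extract_speaker_context transcript_chunks query (extract_speaker_context transcript_chunks query)

-- ===== LEMMAS AND PROOFS =====

def pvSpk (c : List (String × String)) : String := (PySem.Dict.ofList c).getD "speaker" "Unknown"
def pvTxt (c : List (String × String)) : String := PySem.Str.strip ((PySem.Dict.ofList c).getD "text" "")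
def pvScore (q : List String) (t : String) : Int :=
  q.foldl (fun s w => s + (if PySem.Str.isIn w (PySem.Str.lower t) then 1 else 0)) 0
def pvStep (q : List String) (b : Int × String) (t : String) : Int × String :=
  if b.1 < pvScore q t then (pvScore q t, t) else b
def pvOptBest (q : List String) : List String → Option (Int × String)
  | [] => none
  | t :: ts => some (ts.foldl (pvStep q) (pvScore q t, t))

-- the relation B's streaming state bears to A's grouping dict
def pvInv (q : List String) (d : PySem.Dict String (List String))
    (st : List String × PySem.Dict String (Int × String)) : Prop :=
  st.1 = d.keys ∧ d.keys.Nodup ∧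
  (∀ s, d.contains s = false ↔ d.getD s [] = []) ∧
  (∀ s t, t ∈ d.getD s [] → t ≠ "") ∧
  (∀ s, st.2.get? s = pvOptBest q (d.getD s []))

theorem pvInv_step (q : List String) (d : PySem.Dict String (List String))
    (st : List String × PySem.Dict String (Int × String)) (c : List (String × String))
    (h : pvInv q d st) : pvInv q (pvStepA d c) (pvStepB q st c) := by
  obtain ⟨h1, h2, h3, h4, h5⟩ := h
  unfold pvStepA pvStepB
  set sp := (PySem.Dict.ofList c).getD "speaker" "Unknown" with hsp
  set tx := PySem.Str.strip ((PySem.Dict.ofList c).getD "text" "") with htx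
  by_cases ht : tx = ""
  · rw [if_neg (by simpa using ht), if_pos ht]
    exact ⟨h1, h2, h3, h4, h5⟩
  · rw [if_pos ht, if_neg ht]
    show pvInv q (d.modify sp [] fun l => l ++ [tx])
      (if st.2.contains sp = false then (st.1 ++ [sp], st.2.insert sp (pvScore q tx, tx))
       else if (st.2.getD sp (0, "")).1 < pvScore q tx then (st.1, st.2.insert sp (pvScore q tx, tx)) else st)
    rcases hE : d.getD sp [] with _ | ⟨t0, ts⟩
    · -- speaker not seen yet
      have hcf : d.contains sp = false := (h3 sp).2 hE
      have hget : st.2.get? sp = none := by rw [h5 sp, hE]; rfl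
      have hcb : st.2.contains sp = false := by
        rw [PySem.Dict.contains_eq_isSome_get?, hget]; rfl
      rw [if_pos hcb]
      have hkeys : (d.modify sp [] (fun l => l ++ [tx])).keys = d.keys ++ [sp] := by
        rw [PySem.Dict.keys_modify, PySem.Dict.keys_insert_of_not_contains _ _ hcf]
      have hnm : sp ∉ d.keys := by
        intro hm
        rw [← PySem.Dict.contains_iff_mem_keys] at hm
        rw [hcf] at hm; exact Bool.false_ne_true hm
      refine ⟨?_, ?_, ?_, ?_, ?_⟩
      · simpa [hkeys] using congrArg (fun l => l ++ [sp]) h1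
      · rw [hkeys]
        simp only [List.nodup_append, List.nodup_cons, List.not_mem_nil, not_false_iff, List.nodup_nil, true_and, and_true]
        refine ⟨h2, ?_⟩
        intro a ha b hb e
        rw [List.mem_singleton] at hb
        subst hb
        exact hnm (e ▸ ha)
      · intro s
        rw [PySem.Dict.contains_modify, PySem.Dict.getD_modify]
        by_cases hs : s = sp
        · subst hs; simp
        · simp only [if_neg hs]
          simpa [hs] using h3 s
      · intro s t htm
        rw [PySem.Dict.getD_modify] at htm
        by_cases hs : s = sp
        · rw [if_pos hs, hE] at htm
          simp at htm; subst htm; exact ht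
        · rw [if_neg hs] at htm; exact h4 s t htm
      · intro s
        rw [PySem.Dict.get?_insert, PySem.Dict.getD_modify]
        by_cases hs : s = sp
        · rw [if_pos hs, hs, if_pos rfl, hE]
          simp [pvOptBest]
        · rw [if_neg hs, if_neg hs]; exact h5 s
    · -- speaker already has texts
      have hct : d.contains sp = true := by
        rcases Bool.eq_false_or_eq_true (d.contains sp) with hc | hc
        · exact hc
        · exfalso; rw [(h3 sp).1 hc] at hE; exact absurd hE.symm (List.cons_ne_nil _ _)
      set b0 := ts.foldl (pvStep q) (pvScore q t0, t0) with hb0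
      have hget : st.2.get? sp = some b0 := by rw [h5 sp, hE]; rfl
      have hcb : st.2.contains sp = true := by
        rw [PySem.Dict.contains_eq_isSome_get?, hget]; rfl
      rw [if_neg (by rw [hcb]; simp)]
      have hgd : st.2.getD sp (0, "") = b0 := by
        rw [PySem.Dict.getD_eq_get?_getD, hget]; rfl
      rw [hgd]
      have hkeys : (d.modify sp [] (fun l => l ++ [tx])).keys = d.keys := by
        rw [PySem.Dict.keys_modify, PySem.Dict.keys_insert_of_contains _ _ hct]
      have hinv3 : ∀ s, (d.modify sp [] (fun l => l ++ [tx])).contains s = false ↔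
          (d.modify sp [] (fun l => l ++ [tx])).getD s [] = [] := by
        intro s
        rw [PySem.Dict.contains_modify, PySem.Dict.getD_modify]
        by_cases hs : s = sp
        · subst hs; simp [hE]
        · simp only [if_neg hs]
          simpa [hs] using h3 s
      have hinv4 : ∀ s t, t ∈ (d.modify sp [] (fun l => l ++ [tx])).getD s [] → t ≠ "" := by
        intro s t htm
        rw [PySem.Dict.getD_modify] at htm
        by_cases hs : s = sp
        · rw [if_pos hs, hE] at htm
          rcases List.mem_append.1 htm with hm | hm
          · exact h4 sp t (by rw [hE]; exact hm)
          · simp at hm; subst hm; exact ht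
        · rw [if_neg hs] at htm; exact h4 s t htm
      have hopt : pvOptBest q ((d.modify sp [] (fun l => l ++ [tx])).getD sp []) =
          some (pvStep q b0 tx) := by
        rw [PySem.Dict.getD_modify, if_pos rfl, hE]
        show pvOptBest q (t0 :: (ts ++ [tx])) = _
        simp only [pvOptBest, List.foldl_append, List.foldl_cons, List.foldl_nil, hb0]
      by_cases hlt : b0.1 < pvScore q tx
      · rw [if_pos hlt]
        refine ⟨by rw [hkeys]; exact h1, by rw [hkeys]; exact h2, hinv3, hinv4, ?_⟩
        intro s
        rw [PySem.Dict.get?_insert]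
        by_cases hs : s = sp
        · rw [if_pos hs, hs, hopt, pvStep, if_pos hlt]
        · rw [if_neg hs, PySem.Dict.getD_modify, if_neg hs]; exact h5 s
      · rw [if_neg hlt]
        refine ⟨by rw [hkeys]; exact h1, by rw [hkeys]; exact h2, hinv3, hinv4, ?_⟩
        intro s
        by_cases hs : s = sp
        · rw [hs, hopt, pvStep, if_neg hlt, hget]
        · rw [PySem.Dict.getD_modify, if_neg hs]; exact h5 s

theorem pvInv_foldl (q : List String) (l : List (List (String × String)))
    (d : PySem.Dict String (List String)) (st : List String × PySem.Dict String (Int × String))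
    (h : pvInv q d st) : pvInv q (l.foldl pvStepA d) (l.foldl (pvStepB q) st) := by
  induction l generalizing d st with
  | nil => exact h
  | cons c l ih => exact ih _ _ (pvInv_step q d st c h)

theorem pvInv_empty (q : List String) :
    pvInv q PySem.Dict.empty ([], PySem.Dict.empty) := by
  refine ⟨by simp [PySem.Dict.keys_empty], by simp [PySem.Dict.keys_empty], ?_, ?_, ?_⟩
  · intro s; simp [PySem.Dict.contains_empty, PySem.Dict.getD_empty]
  · intro s t ht; simp [PySem.Dict.getD_empty] at ht
  · intro s; simp [PySem.Dict.get?_empty, PySem.Dict.getD_empty, pvOptBest]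

-- head of a stable insertion sort from the left = running strict-improvement fold
theorem pv_head_foldl_insertBy {α : Type} (cmp : α → α → Bool) :
    ∀ (xs : List α) (y : α) (ys : List α), ∃ zs,
      xs.foldl (fun a x => PySem.List.insertBy cmp x a) (y :: ys)
        = (xs.foldl (fun b x => if cmp x b then x else b) y) :: zs := by
  intro xs
  induction xs with
  | nil => intro y ys; exact ⟨ys, rfl⟩
  | cons x xs ih =>
    intro y ys
    rw [List.foldl_cons, List.foldl_cons]
    by_cases h : cmp x y
    · simpa [PySem.List.insertBy, h] using ih x (y :: ys)
    · simpa [PySem.List.insertBy, h] using ih y (PySem.List.insertBy cmp x ys)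

-- A's _best_excerpt on a nonempty list = truncation of the running best
theorem pvBestExcerptA_eq (query : String) (t : String) (ts : List String) :
    pvBestExcerptA (t :: ts) query
      = pvTruncateB ((ts.foldl (pvStep (PySem.Set.ofList (PySem.Str.split₀ (PySem.Str.lower query)))) (pvScore (PySem.Set.ofList (PySem.Str.split₀ (PySem.Str.lower query))) t, t)).2) := by
  set q := (PySem.Set.ofList (PySem.Str.split₀ (PySem.Str.lower query)) : List String) with hq
  have hnil : ((t :: ts : List String).isEmpty) = false := rfl
  unfold pvBestExcerptA
  rw [hnil]
  simp only [Bool.false_eq_true, if_false]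
  have hbody : (fun (acc : List (Int × String)) (text : String) =>
      let t_lower := PySem.Str.lower text
      let score := q.foldl (fun s w => s + (if PySem.Str.isIn w t_lower then 1 else 0)) 0
      acc ++ [(score, text)])
      = (fun acc u => acc ++ [((fun v => (pvScore q v, v)) u)]) := rfl
  rw [hbody, PySem.List.foldl_append_singleton_eq_map]
  rw [PySem.List.sorted_eq_foldl_insertBy]
  set f : String → Int × String := fun v => (pvScore q v, v) with hf
  set cmp : (Int × String) → (Int × String) → Bool :=
    fun a b => decide ((fun (x : Int × String) => -x.1) a < (fun (x : Int × String) => -x.1) b) with hcmp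
  have h0 : PySem.List.insertBy cmp (f t) [] = [f t] := by simp [PySem.List.insertBy]
  rw [List.nil_append, List.map_cons, List.foldl_cons, h0]
  obtain ⟨zs, hzs⟩ := pv_head_foldl_insertBy cmp (ts.map f) (f t) []
  rw [hzs]
  have hhead : (ts.map f).foldl (fun b x => if cmp x b then x else b) (f t)
      = ts.foldl (pvStep q) (pvScore q t, t) := by
    rw [List.foldl_map]
    refine PySem.List.foldl_congr_mem _ _ _ _ ?_
    intro b u _
    show (if cmp (f u) b then f u else b) = pvStep q b u
    rw [hcmp, hf, pvStep]
    by_cases hlt : b.1 < pvScore q u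
    · rw [if_pos hlt, if_pos (by simpa using hlt)]
    · rw [if_neg hlt, if_neg (by simpa using hlt)]
  rw [hhead]
  rfl

theorem pvFoldl_step_snd (q : List String) :
    ∀ (ts : List String) (b : Int × String),
      (ts.foldl (pvStep q) b).2 = b.2 ∨ (ts.foldl (pvStep q) b).2 ∈ ts := by
  intro ts
  induction ts with
  | nil => intro b; left; rfl
  | cons t ts ih =>
    intro b
    rcases ih (pvStep q b t) with h | h
    · rw [List.foldl_cons]
      by_cases hc : b.1 < pvScore q t
      · right; rw [h]; simp [pvStep, hc]
      · left; rw [h]; simp [pvStep, hc]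
    · right; rw [List.foldl_cons]; exact List.mem_cons_of_mem _ h

theorem pvTruncateB_ne_empty (t : String) (h : t ≠ "") : pvTruncateB t ≠ "" := by
  unfold pvTruncateB
  by_cases hl : 200 < PySem.Str.len t
  · simp only [hl, if_true]
    have hlt : t.toList ≠ [] := by
      intro e
      rw [PySem.Str.len_eq, e] at hl; simp at hl
    set cutoff := PySem.Str.rfind (PySem.Str.slice t none (some 200)) ". " with hc
    by_cases h1 : 100 < cutoff
    · simp only [h1, if_true]
      intro e
      have : (PySem.Str.slice t none (some (cutoff + 1))).toList = [] := by rw [e]; rfl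
      rw [PySem.Str.toList_slice, PySem.Chars.slice_eq_listSlice,
        PySem.List.slice_to _ (by omega)] at this
      rw [List.take_eq_nil_iff] at this
      rcases this with h2 | h2
      · omega
      · exact hlt h2
    · simp only [h1, if_false]
      intro e
      have : ((PySem.Str.slice t none (some 200)) ++ "…").toList = [] := by rw [e]; rfl
      rw [String.toList_append] at this
      simp at this
  · rw [if_neg hl]; exact h

-- ===== VERDICT (by name: the statement is the Claim_ definition above) =====
theorem extract_speaker_context_spec : Claim_equal_extract_speaker_context := by
  unfold Claim_equal_extract_speaker_context
  intro chunks query _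
  unfold Spec_extract_speaker_context
  unfold extract_speaker_context extract_speaker_context_alt
  by_cases hnil : chunks.isEmpty
  · rw [if_pos hnil, if_pos hnil]
  · rw [if_neg hnil, if_neg hnil]
    set q := (PySem.Set.ofList (PySem.Str.split₀ (PySem.Str.lower query)) : List String) with hq
    set d := chunks.foldl pvStepA PySem.Dict.empty with hd
    set st := chunks.foldl (pvStepB q) ([], PySem.Dict.empty) with hst
    obtain ⟨h1, h2, h3, h4, h5⟩ := pvInv_foldl q chunks PySem.Dict.empty ([], PySem.Dict.empty) (pvInv_empty q)
    rw [← hd] at h2 h3 h4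
    rw [← hd, ← hst] at h1 h5
    set partB : String → String := fun speaker =>
      (if speaker ≠ "" ∧ speaker ≠ "Unknown" then speaker ++ ":" else "Transcript:")
        ++ " \"" ++ pvTruncateB ((st.2.getD speaker (0, "")).2) ++ "\"" with hpartB
    set F : List String → String × List String → List String :=
      fun parts p =>
        let excerpt := pvBestExcerptA p.2 query
        if excerpt ≠ "" then
          let label := if p.1 ≠ "" ∧ p.1 ≠ "Unknown" then p.1 ++ ":" else "Transcript:"
          parts ++ [label ++ " \"" ++ excerpt ++ "\""]
        else parts with hF
    by_cases hempty : d.items.isEmpty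
    · rw [if_pos hempty]
      show ("" : String) = PySem.Str.join "\n\n" ((st.1.take 3).map partB)
      have hit : d.items = [] := by simpa using hempty
      have hk : d.keys = [] := by
        show d.items.map (·.1) = []
        rw [hit]; rfl
      rw [h1, hk]
      rfl
    · rw [if_neg hempty]
      show PySem.Str.join "\n\n" ((d.items.take 3).foldl F [])
          = PySem.Str.join "\n\n" ((st.1.take 3).map partB)
      have hitems : d.items = d.keys.map (fun k => (k, d.getD k [])) :=
        PySem.Dict.items_eq_map_keys d h2 []
      have hcong : ∀ (acc : List String), ∀ k ∈ d.keys.take 3,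
          F acc (k, d.getD k []) = acc ++ [partB k] := by
        intro acc k hk3
        have hkm : k ∈ d.keys := List.mem_of_mem_take hk3
        have hkc : d.contains k = true := (PySem.Dict.contains_iff_mem_keys d k).2 hkm
        have hgne : d.getD k [] ≠ [] := by
          intro e
          have := (h3 k).2 e
          rw [hkc] at this; exact Bool.noConfusion this
        rcases he : d.getD k [] with _ | ⟨t0, ts⟩
        · exact absurd he hgne
        · set bp := ts.foldl (pvStep q) (pvScore q t0, t0) with hbp
          have hget : st.2.get? k = some bp := by rw [h5 k, he]; rfl
          have hgdk : st.2.getD k (0, "") = bp := by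
            rw [PySem.Dict.getD_eq_get?_getD, hget]; rfl
          have hbne : bp.2 ≠ "" := by
            rcases pvFoldl_step_snd q ts (pvScore q t0, t0) with hm | hm
            · rw [← hbp] at hm; rw [hm]
              exact h4 k t0 (by rw [he]; exact List.mem_cons_self)
            · rw [← hbp] at hm
              exact h4 k bp.2 (by rw [he]; exact List.mem_cons_of_mem _ hm)
          have htne : pvTruncateB bp.2 ≠ "" := pvTruncateB_ne_empty _ hbne
          show (if pvBestExcerptA (t0 :: ts) query ≠ "" then
              acc ++ [(if k ≠ "" ∧ k ≠ "Unknown" then k ++ ":" else "Transcript:")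
                ++ " \"" ++ pvBestExcerptA (t0 :: ts) query ++ "\""]
            else acc) = acc ++ [partB k]
          rw [pvBestExcerptA_eq, ← hq, ← hbp, if_pos htne, hpartB]
          simp only [hgdk]
      have hparts : (d.items.take 3).foldl F [] = (st.1.take 3).map partB := by
        rw [hitems, ← List.map_take, List.foldl_map,
          PySem.List.foldl_congr_mem _ _ _ _ hcong,
          PySem.List.foldl_append_singleton_eq_map, List.nil_append, h1]
      rw [hparts]
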